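-- pv_equiv track=rewrite | github.com/kush0in/PromptScrapper | threads_saved_to_cloudinary.py | _pick_caption_from_text_block
-- ===== SOURCE A (Python) =====
-- _UI_NOISE_WORDS = {
--     "like", "reply", "repost", "share", "follow", "translate", "more", "see more",
--     "followers", "following", "posts", "views", "comments"
-- }
--
-- def _pick_caption_from_text_block(text_block):
--     try:
--         lines = [" ".join(line.split()) for line in text_block.splitlines()]
--         candidates = []
--         for line in lines:
--             if not line:
--                 continue
--             low = line.lower()
--             if any(w in low for w in _UI_NOISE_WORDS):
--                 if len(low) <= 14:
--                     continue
--             if low.endswith("h") or low.endswith("m") or low.endswith("d"):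
--                 if len(low) <= 3 and low[:-1].isdigit():
--                     continue
--             if low.isdigit():
--                 continue
--             if len(line) < 2:
--                 continue
--             candidates.append(line)
--         if candidates:
--             candidates.sort(key=lambda s: len(s), reverse=True)
--             return candidates[0]
--         return ""
--     except Exception:
--         return ""
-- ===== SOURCE B (Python) =====
-- _UI_NOISE_WORDS = {
--     "like", "reply", "repost", "share", "follow", "translate", "more", "see more",
--     "followers", "following", "posts", "views", "comments"
-- }
--
--
-- def _keeps(line):
--     low = line.lower()
--     return (len(line) >= 2
--             and not (any(w in low for w in _UI_NOISE_WORDS) and len(low) <= 14)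
--             and not (low.endswith(("h", "m", "d"))
--                      and len(low) <= 3 and low[:-1].isdigit())
--             and not low.isdigit())
--
--
-- def _pick_caption_from_text_block(text_block):
--     try:
--         best = ""
--         for raw in text_block.splitlines():
--             line = " ".join(raw.split())
--             if _keeps(line) and len(line) > len(best):
--                 best = line
--         return best
--     except Exception:
--         return ""
-- ===== Notes on version B (the rewrite author's own statement) =====
-- stated objective: simpler
-- what changed: Replaces the candidates list plus stable reverse length-sort with a single pass keeping one best-so-far string (strict > so the earliest of equal-length lines wins), with the skip guards folded into one boolean predicate.
import Mathlib
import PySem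

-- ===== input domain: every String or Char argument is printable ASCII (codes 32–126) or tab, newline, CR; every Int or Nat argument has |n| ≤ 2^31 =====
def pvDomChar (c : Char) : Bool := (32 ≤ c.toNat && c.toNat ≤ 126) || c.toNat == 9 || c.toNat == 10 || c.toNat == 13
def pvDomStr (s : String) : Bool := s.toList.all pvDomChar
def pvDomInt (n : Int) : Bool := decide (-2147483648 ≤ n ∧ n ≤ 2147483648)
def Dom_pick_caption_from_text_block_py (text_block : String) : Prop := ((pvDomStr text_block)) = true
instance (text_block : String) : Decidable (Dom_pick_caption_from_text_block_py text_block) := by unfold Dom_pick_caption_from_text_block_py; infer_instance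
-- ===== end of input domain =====

-- B replaces A's candidates-list + stable reverse length-sort by a one-pass running best (strict >, so the earliest of equal-length lines wins); return values proved equal.

-- ===== PORT A =====
def pvNoiseWords : List String :=
  ["like", "reply", "repost", "share", "follow", "translate", "more", "see more",
   "followers", "following", "posts", "views", "comments"]

-- loop body of A's candidate-collecting for-loop (the continue-chain as nested ifs; 'low' inlined as 'PySem.Str.lower line')
def pvAStep (cand : List String) (line : String) : List String :=
  if line = "" then cand
  else if pvNoiseWords.any (fun w => PySem.Str.isIn w (PySem.Str.lower line))
          && decide (PySem.Str.len (PySem.Str.lower line) ≤ 14) then cand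
  else if (PySem.Str.endswith (PySem.Str.lower line) "h" || PySem.Str.endswith (PySem.Str.lower line) "m"
             || PySem.Str.endswith (PySem.Str.lower line) "d")
          && (decide (PySem.Str.len (PySem.Str.lower line) ≤ 3)
              && PySem.Str.strIsdigit (PySem.Str.slice (PySem.Str.lower line) none (some (-1)))) then cand
  else if PySem.Str.strIsdigit (PySem.Str.lower line) then cand
  else if decide (PySem.Str.len line < 2) then cand
  else cand ++ [line]

def pick_caption_from_text_block_py (text_block : String) : String :=
  let lines := (PySem.Str.splitlines text_block).map
    (fun line => PySem.Str.join " " (PySem.Str.split₀ line))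
  let candidates := lines.foldl pvAStep []
  if candidates.isEmpty then ""
  else
    match PySem.List.sorted candidates PySem.Str.len true with
    | [] => ""
    | c :: _ => c

-- ===== PORT B =====
-- B's _keeps(line): one boolean predicate
def pvKeeps (line : String) : Bool :=
  decide (2 ≤ PySem.Str.len line)
  && !(pvNoiseWords.any (fun w => PySem.Str.isIn w (PySem.Str.lower line))
       && decide (PySem.Str.len (PySem.Str.lower line) ≤ 14))
  && !((PySem.Str.endswith (PySem.Str.lower line) "h" || PySem.Str.endswith (PySem.Str.lower line) "m"
          || PySem.Str.endswith (PySem.Str.lower line) "d")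
       && (decide (PySem.Str.len (PySem.Str.lower line) ≤ 3)
           && PySem.Str.strIsdigit (PySem.Str.slice (PySem.Str.lower line) none (some (-1)))))
  && !PySem.Str.strIsdigit (PySem.Str.lower line)

def pick_caption_from_text_block_py_alt (text_block : String) : String :=
  (PySem.Str.splitlines text_block).foldl
    (fun best raw =>
      let line := PySem.Str.join " " (PySem.Str.split₀ raw)
      if pvKeeps line && decide (PySem.Str.len best < PySem.Str.len line) then line else best)
    ""

-- ===== PRECONDITION & SPEC =====
def Spec_pick_caption_from_text_block_py (text_block : String) (out : String) : Prop := out = pick_caption_from_text_block_py_alt text_block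
instance (text_block : String) (out : String) : Decidable (Spec_pick_caption_from_text_block_py text_block out) := by unfold Spec_pick_caption_from_text_block_py; infer_instance

-- ===== CLAIM (what is proved, stated in full; the proofs are below) =====
def Claim_equal_pick_caption_from_text_block_py : Prop := ∀ (text_block : String), Dom_pick_caption_from_text_block_py text_block → Spec_pick_caption_from_text_block_py text_block (pick_caption_from_text_block_py text_block)

-- ===== LEMMAS AND PROOFS =====

-- A's loop body appends exactly when B's keep-predicate holds
theorem pvAStep_eq (cand : List String) (line : String) :
    pvAStep cand line = if pvKeeps line then cand ++ [line] else cand := by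
  by_cases h0 : line = ""
  · subst h0
    simp [pvAStep, pvKeeps, PySem.Str.len_eq]
  · have hne : line.toList ≠ [] := fun h => h0 (by
      have := congrArg String.ofList h
      simpa using this)
    have hlen : 1 ≤ line.toList.length := List.length_pos_iff.mpr hne
    unfold pvAStep pvKeeps
    rw [if_neg h0]
    generalize ((pvNoiseWords.any fun w => PySem.Str.isIn w (PySem.Str.lower line))
        && decide (PySem.Str.len (PySem.Str.lower line) ≤ 14)) = b1
    generalize ((PySem.Str.endswith (PySem.Str.lower line) "h" || PySem.Str.endswith (PySem.Str.lower line) "m"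
          || PySem.Str.endswith (PySem.Str.lower line) "d")
        && (decide (PySem.Str.len (PySem.Str.lower line) ≤ 3)
            && PySem.Str.strIsdigit (PySem.Str.slice (PySem.Str.lower line) none (some (-1))))) = b2
    generalize PySem.Str.strIsdigit (PySem.Str.lower line) = b3
    simp only [PySem.Str.len_eq]
    cases b1 <;> cases b2 <;> cases b3 <;> split_ifs with h2 h3 <;> simp_all <;> omega

-- the candidates list is the keep-filter of the normalized lines
theorem pvCands_eq (lines : List String) (acc : List String) :
    lines.foldl pvAStep acc = acc ++ lines.filter pvKeeps := by
  induction lines generalizing acc with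
  | nil => simp
  | cons l t ih =>
    simp only [List.foldl_cons, List.filter_cons, pvAStep_eq]
    by_cases h : pvKeeps l <;> simp [h, ih]

-- head of insertBy
theorem pvHead_insertBy {α : Type} (before : α → α → Bool) (x : α) (ys : List α) :
    (PySem.List.insertBy before x ys).head? =
      some (match ys.head? with | none => x | some h => if before x h then x else h) := by
  cases ys with
  | nil => simp [PySem.List.insertBy]
  | cons h t =>
    simp only [PySem.List.insertBy, List.head?_cons]
    split <;> simp_all

-- head of the insertion-sort foldl is an option-valued running first-max
theorem pvHead_foldl_insertBy {α : Type} (before : α → α → Bool) (cs : List α) (acc : List α) :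
    (cs.foldl (fun a x => PySem.List.insertBy before x a) acc).head? =
      cs.foldl (fun o x => some (match o with | none => x | some h => if before x h then x else h)) acc.head? := by
  induction cs generalizing acc with
  | nil => rfl
  | cons c t ih =>
    simp only [List.foldl_cons]
    rw [ih, pvHead_insertBy]

-- the option-valued running max over `some b` is the plain running max
theorem pvFoldl_some {α : Type} (before : α → α → Bool) (cs : List α) (b : α) :
    cs.foldl (fun o x => some (match o with | none => x | some h => if before x h then x else h)) (some b)
      = some (cs.foldl (fun h x => if before x h then x else h) b) := by
  induction cs generalizing b with
  | nil => rfl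
  | cons c t ih => simp only [List.foldl_cons]; rw [ih]

-- every kept line has length ≥ 2
theorem pvKeeps_len {line : String} (h : pvKeeps line = true) : 2 ≤ PySem.Str.len line := by
  unfold pvKeeps at h
  simp only [Bool.and_eq_true, decide_eq_true_eq] at h
  exact h.1.1.1

-- ===== VERDICT (by name: the statement is the Claim_ definition above) =====
theorem pick_caption_from_text_block_py_spec : Claim_equal_pick_caption_from_text_block_py := by
  intro text_block _
  unfold Spec_pick_caption_from_text_block_py pick_caption_from_text_block_py pick_caption_from_text_block_py_alt
  generalize (PySem.Str.splitlines text_block) = raws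
  show (List.foldl pvAStep [] (raws.map (fun line => PySem.Str.join " " (PySem.Str.split₀ line))) |> fun candidates =>
      if candidates.isEmpty then ""
      else match PySem.List.sorted candidates PySem.Str.len true with
        | [] => ""
        | c :: _ => c)
    = raws.foldl (fun best raw =>
        let line := PySem.Str.join " " (PySem.Str.split₀ raw)
        if pvKeeps line && decide (PySem.Str.len best < PySem.Str.len line) then line else best) ""
  -- fold B over the normalized lines instead of the raw ones
  rw [show raws.foldl (fun best raw =>
        let line := PySem.Str.join " " (PySem.Str.split₀ raw)
        if pvKeeps line && decide (PySem.Str.len best < PySem.Str.len line) then line else best) ""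
      = (raws.map (fun line => PySem.Str.join " " (PySem.Str.split₀ line))).foldl
          (fun best line => if pvKeeps line && decide (PySem.Str.len best < PySem.Str.len line) then line else best) ""
    from by rw [List.foldl_map]]
  generalize (raws.map (fun line => PySem.Str.join " " (PySem.Str.split₀ line))) = lines
  rw [pvCands_eq lines [], List.nil_append]
  -- push B's keep test into a filter
  rw [show lines.foldl
        (fun best line => if pvKeeps line && decide (PySem.Str.len best < PySem.Str.len line) then line else best) ""
      = (lines.filter pvKeeps).foldl
          (fun best line => if decide (PySem.Str.len best < PySem.Str.len line) then line else best) "" by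
    rw [List.foldl_filter]
    apply List.foldl_ext
    intro b l _
    by_cases h : pvKeeps l <;> simp [h]]
  cases hc : lines.filter pvKeeps with
  | nil => simp
  | cons c cs =>
    have hc2 : 2 ≤ PySem.Str.len c := pvKeeps_len (List.of_mem_filter (hc ▸ List.mem_cons_self))
    simp only [List.isEmpty_cons, if_neg Bool.false_ne_true]
    -- head of the stable reverse sort = running first-max starting from the first candidate
    have hs : (cs.foldl (fun a x => PySem.List.insertBy
          (fun a b => decide (PySem.Str.len b < PySem.Str.len a)) x a) [c]).head?
        = some (cs.foldl (fun h x => if decide (PySem.Str.len h < PySem.Str.len x) then x else h) c) := by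
      rw [pvHead_foldl_insertBy]
      simp only [List.head?_cons]
      exact pvFoldl_some _ _ _
    have hsort : PySem.List.sorted (c :: cs) PySem.Str.len true
        = cs.foldl (fun a x => PySem.List.insertBy
            (fun a b => decide (PySem.Str.len b < PySem.Str.len a)) x a) [c] := rfl
    rw [hsort]
    -- B side: the first step absorbs "" since len c ≥ 2 > 0
    have hfirst : (if (decide (PySem.Str.len "" < PySem.Str.len c)) = true then c else "") = c := by
      rw [if_pos]
      simp only [decide_eq_true_eq]
      have : PySem.Str.len "" = 0 := by decide
      omega
    rw [List.foldl_cons, hfirst]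
    -- both sides are now the same running max over cs starting from c
    cases hres : (cs.foldl (fun a x => PySem.List.insertBy
        (fun a b => decide (PySem.Str.len b < PySem.Str.len a)) x a) [c]) with
    | nil =>
      exfalso
      have := congrArg List.head? hres
      rw [hs] at this
      simp at this
    | cons m t =>
      have := congrArg List.head? hres
      rw [hs] at this
      simp only [List.head?_cons, Option.some.injEq] at this
      exact this.symm
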